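-- pv_equiv track=rewrite | github.com/Hehwang/Leetcode-Python | code/581 Shortest Unsorted Continuous Subarray.py | helper
-- ===== SOURCE A (Python) =====
-- def helper(nums):
--     stack1=[nums[0]]
--     flag=0
--     for i in range(1,len(nums)):
--         if nums[i]>=stack1[-1]:
--             if flag==0:
--                 stack1.append(nums[i])
--                 continue
--             else:
--                 continue
--         else:
--             flag=1
--             while len(stack1)>0 and nums[i]<stack1[-1]:
--                 tmp=stack1.pop()
--         if len(stack1)==0:
--             break
--     return len(stack1)
-- ===== SOURCE B (Python) =====
-- def helper(nums):
--     first = nums[0]  # like A, raises IndexError on empty input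
--     t = 1
--     while t < len(nums) and nums[t] >= nums[t - 1]:
--         t += 1
--     if t == len(nums):
--         return t
--     m = min(nums[t:])
--     return sum(1 for v in nums[:t] if v <= m)
-- ===== Notes on version B (the rewrite author's own statement) =====
-- stated objective: simpler
-- what changed: Replaces the stack simulation (push on the non-decreasing prefix, then pop-while on each later element) by a direct prefix-scan: compute the longest non-decreasing prefix length t, and if the list is not fully sorted return the count of prefix elements <= min(nums[t:]).
import Mathlib
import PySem

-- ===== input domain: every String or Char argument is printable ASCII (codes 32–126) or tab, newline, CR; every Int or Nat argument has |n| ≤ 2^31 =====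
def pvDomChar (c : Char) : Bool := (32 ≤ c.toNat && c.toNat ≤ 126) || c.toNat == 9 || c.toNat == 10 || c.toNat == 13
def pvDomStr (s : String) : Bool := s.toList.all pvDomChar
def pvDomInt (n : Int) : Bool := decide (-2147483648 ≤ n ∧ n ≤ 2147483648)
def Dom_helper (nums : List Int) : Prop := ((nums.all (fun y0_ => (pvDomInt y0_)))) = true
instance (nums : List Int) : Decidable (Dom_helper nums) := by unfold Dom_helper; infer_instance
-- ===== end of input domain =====

-- B replaces A's stack simulation by a prefix-scan + min + count; equal return value on all nonempty lists (both raise IndexError on []).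

-- ===== PORT A =====
-- the inner `while len(stack1)>0 and nums[i]<stack1[-1]: stack1.pop()` loop;
-- the stack is kept top-first (head = stack1[-1]), so pop = drop the head
def popWhile (x : Int) : List Int → List Int
  | [] => []
  | t :: r => if x < t then popWhile x r else t :: r

-- the `for i in range(1, len(nums))` loop; state: stack (top-first), flag; the
-- `break` on an emptied stack becomes returning 0 immediately
def helperGo (st : List Int) (flag : Bool) : List Int → Int
  | [] => (st.length : Int)
  | x :: rest =>
    if st.headD 0 ≤ x then
      helperGo (if flag then st else x :: st) flag rest
    else
      let st' := popWhile x st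
      if st'.length = 0 then 0 else helperGo st' true rest

def helper (nums : List Int) : Int :=
  match nums with
  | [] => 0          -- Python raises IndexError on nums[0]; excluded by Pre_helper
  | h :: t => helperGo [h] false t

-- ===== PORT B =====
-- longest non-decreasing run: the `while t < len(nums) and nums[t] >= nums[t-1]` scan
def prefLen (p : Int) : List Int → Nat
  | [] => 0
  | x :: r => if p ≤ x then 1 + prefLen x r else 0

def helper_alt (nums : List Int) : Int :=
  match nums with
  | [] => 0          -- Python raises IndexError on nums[0]; excluded by Pre_helper
  | h :: tl =>
    let t := 1 + prefLen h tl
    if t = nums.length then (t : Int)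
    else
      let suf := nums.drop t
      let m := suf.foldl min (suf.headD 0)     -- min(nums[t:]) (suf nonempty here)
      (((nums.take t).countP (fun v => decide (v ≤ m))) : Int)

-- ===== PRECONDITION & SPEC =====
-- Pre_ excludes only the empty list, on which A (and B) raise IndexError.
def Pre_helper (nums : List Int) : Prop := nums ≠ []
instance (nums : List Int) : Decidable (Pre_helper nums) := by unfold Pre_helper; infer_instance
def pvWitness_helper : List Int := [2, 1, 3]

def Spec_helper (nums : List Int) (out : Int) : Prop := out = helper_alt nums
instance (nums : List Int) (out : Int) : Decidable (Spec_helper nums out) := by unfold Spec_helper; infer_instance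

-- ===== CLAIM (what is proved, stated in full; the proofs are below) =====
def Claim_equal_helper : Prop := ∀ (nums : List Int), Dom_helper nums → Pre_helper nums → Spec_helper nums (helper nums)

-- ===== LEMMAS AND PROOFS =====

theorem popWhile_eq_filter (x : Int) (st : List Int) (h : st.Pairwise (· ≥ ·)) :
    popWhile x st = st.filter (fun v => decide (v ≤ x)) := by
  induction st with
  | nil => rfl
  | cons t r ih =>
    rcases List.pairwise_cons.mp h with ⟨ht, hr⟩
    by_cases hx : x < t
    · simp [popWhile, hx, show ¬ (t ≤ x) by omega, ih hr]
    · have htx : t ≤ x := by omega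
      have : r.filter (fun v => decide (v ≤ x)) = r := by
        apply List.filter_eq_self.mpr
        intro v hv; simp; exact le_trans (ht v hv) htx
      simp [popWhile, hx, htx, this]

theorem go_true (xs : List Int) : ∀ st : List Int, st ≠ [] → st.Pairwise (· ≥ ·) →
    helperGo st true xs = (st.countP (fun v => xs.all (fun x => decide (v ≤ x))) : Int) := by
  induction xs with
  | nil => intro st _ _; simp [helperGo, List.countP_true]
  | cons x rest ih =>
    intro st hne hp
    obtain ⟨h, tl, rfl⟩ := List.exists_cons_of_ne_nil hne
    rcases List.pairwise_cons.mp hp with ⟨hh, htl⟩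
    by_cases hx : h ≤ x
    · -- skip: every stack element is ≤ h ≤ x
      rw [show helperGo (h :: tl) true (x :: rest) = helperGo (h :: tl) true rest from by
            simp [helperGo, hx],
          ih (h :: tl) hne hp]
      congr 1
      apply List.countP_congr
      intro v hv
      have hvx : v ≤ x := by
        rcases List.mem_cons.mp hv with h1 | h1
        · omega
        · exact le_trans (hh v h1) hx
      simp [hvx]
    · have hpop : popWhile x (h :: tl) = (h :: tl).filter (fun v => decide (v ≤ x)) :=
        popWhile_eq_filter x _ hp
      simp only [helperGo, List.headD_cons, if_neg hx, hpop]
      set f := (h :: tl).filter (fun v => decide (v ≤ x)) with hf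
      have hcnt : (h :: tl).countP (fun v => (x :: rest).all (fun y => decide (v ≤ y)))
          = f.countP (fun v => rest.all (fun y => decide (v ≤ y))) := by
        rw [hf, List.countP_filter]
        apply List.countP_congr
        intro v _
        simp [List.all_cons, Bool.and_comm]
      by_cases hemp : f.length = 0
      · have hfe : f = [] := List.length_eq_zero_iff.mp hemp
        simp only [hcnt, hfe, List.countP_nil]; rfl
      · have hfne : f ≠ [] := by
          intro h0; rw [h0] at hemp; simp at hemp
        have hfp : f.Pairwise (· ≥ ·) := List.Pairwise.filter _ hp
        rw [if_neg hemp, ih f hfne hfp, hcnt]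

-- phase 1: while flag = false the loop just pushes the non-decreasing run
theorem go_false' (xs : List Int) : ∀ (p : Int) (s : List Int),
    helperGo (p :: s) false xs =
      if prefLen p xs = xs.length
      then ((xs.length + (p :: s).length : Nat) : Int)
      else helperGo ((xs.take (prefLen p xs)).reverse ++ (p :: s)) true (xs.drop (prefLen p xs)) := by
  induction xs with
  | nil => intro p s; simp [helperGo, prefLen]
  | cons x rest ih =>
    intro p s
    by_cases hx : p ≤ x
    · have hpl : prefLen p (x :: rest) = 1 + prefLen x rest := by simp [prefLen, hx]
      have := ih x (p :: s)
      simp only [helperGo, List.headD_cons, if_pos hx, if_neg (by simp : ¬ (false = true))] at *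
      rw [this, hpl]
      by_cases he : prefLen x rest = rest.length
      · rw [if_pos he, if_pos (show 1 + prefLen x rest = (x :: rest).length by
              rw [he, List.length_cons, Nat.add_comm])]
        push_cast; simp; omega
      · rw [if_neg he, if_neg (show ¬ (1 + prefLen x rest = (x :: rest).length) by
              rw [List.length_cons]; omega)]
        have htk : ((x :: rest).take (1 + prefLen x rest)).reverse ++ (p :: s)
            = (rest.take (prefLen x rest)).reverse ++ (x :: p :: s) := by
          simp [Nat.add_comm 1 (prefLen x rest)]
        have hdr : (x :: rest).drop (1 + prefLen x rest) = rest.drop (prefLen x rest) := by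
          simp [Nat.add_comm 1 (prefLen x rest)]
        rw [htk, hdr]
    · have hpl : prefLen p (x :: rest) = 0 := by simp [prefLen, hx]
      rw [if_neg (by simp [hpl])]
      simp only [hpl, List.take_zero, List.reverse_nil, List.nil_append, List.drop_zero]
      -- in this branch the first step of both sides is the pop phase, identical for both flags
      simp [helperGo, hx]

-- the non-decreasing run p :: take (prefLen p xs) xs really is non-decreasing
theorem prefLen_sorted (xs : List Int) : ∀ p : Int,
    (p :: xs.take (prefLen p xs)).Pairwise (· ≤ ·) := by
  induction xs with
  | nil => intro p; simp [prefLen]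
  | cons x rest ih =>
    intro p
    by_cases hx : p ≤ x
    · have hpl : prefLen p (x :: rest) = 1 + prefLen x rest := by simp [prefLen, hx]
      rw [hpl]
      have h2 := ih x
      rw [Nat.add_comm, List.take_succ_cons]
      refine List.pairwise_cons.mpr ⟨?_, h2⟩
      intro v hv
      rcases List.mem_cons.mp hv with h1 | h1
      · omega
      · have := (List.pairwise_cons.mp h2).1 v h1
        omega
    · have hpl : prefLen p (x :: rest) = 0 := by simp [prefLen, hx]
      simp [hpl]

theorem prefLen_le (xs : List Int) : ∀ p : Int, prefLen p xs ≤ xs.length := by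
  induction xs with
  | nil => intro p; simp [prefLen]
  | cons x rest ih =>
    intro p
    by_cases hx : p ≤ x
    · simp [prefLen, hx]; have := ih x; omega
    · simp [prefLen, hx]

theorem le_foldl_min (l : List Int) : ∀ (a v : Int),
    (v ≤ l.foldl min a) ↔ (v ≤ a ∧ ∀ x ∈ l, v ≤ x) := by
  induction l with
  | nil => intro a v; simp
  | cons b r ih =>
    intro a v
    simp only [List.foldl_cons, ih, le_min_iff, List.mem_cons]
    constructor
    · rintro ⟨⟨h1, h2⟩, h3⟩
      refine ⟨h1, ?_⟩
      rintro y (rfl | hy)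
      · exact h2
      · exact h3 y hy
    · rintro ⟨h1, h2⟩
      exact ⟨⟨h1, h2 b (Or.inl rfl)⟩, fun x hx => h2 x (Or.inr hx)⟩

-- ===== VERDICT (by name: the statement is the Claim_ definition above) =====
theorem helper_spec : Claim_equal_helper := by
  intro nums _ hpre
  unfold Spec_helper
  obtain ⟨h, tl, rfl⟩ := List.exists_cons_of_ne_nil hpre
  set k := prefLen h tl with hk
  show helperGo [h] false tl = helper_alt (h :: tl)
  rw [go_false' tl h []]
  by_cases hfull : k = tl.length
  · simp only [← hk, if_pos hfull, helper_alt]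
    rw [if_pos (by simp [hfull]; omega)]
    push_cast; simp [hfull]; omega
  · simp only [← hk, if_neg hfull]
    -- pushed stack = reverse of the non-decreasing prefix
    have hsorted : ((tl.take k).reverse ++ [h]).Pairwise (· ≥ ·) := by
      have := prefLen_sorted tl h
      have h2 : (h :: tl.take k).Pairwise (· ≤ ·) := this
      have h3 : ((h :: tl.take k).reverse).Pairwise (· ≥ ·) := by
        rw [List.pairwise_reverse]; exact h2
      simpa using h3
    have hne : (tl.take k).reverse ++ [h] ≠ [] := by simp
    rw [go_true (tl.drop k) _ hne hsorted]
    -- B side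
    show _ = helper_alt (h :: tl)
    simp only [helper_alt]
    rw [if_neg (by simp [← hk]; omega)]
    have hklen : k ≤ tl.length := prefLen_le tl h
    have hdropcons : (h :: tl).drop (1 + k) = tl.drop k := by
      simp [Nat.add_comm 1 k]
    have htakecons : (h :: tl).take (1 + k) = h :: tl.take k := by
      simp [Nat.add_comm 1 k]
    simp only [← hk, hdropcons, htakecons]
    set suf := tl.drop k with hsuf
    have hsufne : suf ≠ [] := by
      rw [hsuf]; intro h0
      have := List.drop_eq_nil_iff.mp h0
      omega
    set m := suf.foldl min (suf.headD 0) with hm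
    have hiff : ∀ v : Int, (suf.all (fun x => decide (v ≤ x))) = decide (v ≤ m) := by
      intro v
      obtain ⟨a, l, ha⟩ := List.exists_cons_of_ne_nil hsufne
      rw [ha] at hm ⊢
      simp only [List.all_cons, List.headD_cons, List.foldl_cons, min_self] at hm ⊢
      by_cases hv : v ≤ l.foldl min a
      · have := (le_foldl_min l a v).mp hv
        simp [hm, hv, this.1]
        intro y hy; exact this.2 y hy
      · rw [hm] at *
        simp only [decide_eq_false hv, Bool.and_eq_false_iff]
        by_cases hva : v ≤ a
        · right
          have : ¬ (∀ x ∈ l, v ≤ x) := by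
            intro hall; exact hv ((le_foldl_min l a v).mpr ⟨hva, hall⟩)
          rw [not_forall] at this
          simp only [not_forall, exists_prop, not_le] at this
          obtain ⟨x, hx, hvx⟩ := this
          simp only [List.all_eq_false]
          exact ⟨x, hx, by simp; omega⟩
        · left; simp [hva]
    have hcnteq : ((tl.take k).reverse ++ [h]).countP (fun v => suf.all (fun x => decide (v ≤ x)))
        = (h :: tl.take k).countP (fun v => decide (v ≤ m)) := by
      have hperm : ((tl.take k).reverse ++ [h]).Perm (h :: tl.take k) :=
        ((List.reverse_perm _).append_right [h]).trans (List.perm_append_singleton h _)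
      have hfun : (fun v : Int => suf.all (fun x => decide (v ≤ x))) = (fun v => decide (v ≤ m)) :=
        funext hiff
      rw [hfun, hperm.countP_eq]
    rw [hcnteq]
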